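-- pv_equiv track=rewrite | github.com/MrBrantCode/unitest_baseline | mut_generate/mist_train_taco/taco_5593/solution.py | find_divisors_and_xor
-- ===== SOURCE A (Python) =====
-- def find_divisors_and_xor(n: int) -> list[int]:
--     if n == 1:
--         return [0]
--
--     result = [1]
--     i = 2
--     while i * i <= n:
--         if n % i == 0:
--             result.append(i)
--             if i != n // i:
--                 result.append(n // i)
--         i += 1
--
--     result.sort()
--     xor_result = 0
--     for d in result:
--         xor_result ^= d
--
--     result.append(xor_result)
--     return result
-- ===== SOURCE B (Python) =====
-- def find_divisors_and_xor(n: int) -> list[int]: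
--     if n == 1:
--         return [0]
--     m = n
--     divisors = [1]
--     p = 2
--     while p * p <= m:
--         powers = []
--         q = 1
--         while m % p == 0:
--             m //= p
--             q *= p
--             powers.append(q)
--         divisors = divisors + [d * pk for pk in powers for d in divisors]
--         p += 1
--     if m > 1:
--         divisors = divisors + [d * m for d in divisors]
--     result = sorted(d for d in divisors if d != n)
--     xor_result = 0
--     for d in result:
--         xor_result ^= d
--     result.append(xor_result)
--     return result
-- ===== Notes on version B (the rewrite author's own statement) =====
-- stated objective: alternative
-- what changed: B factorises n by trial division and generates the divisor list multiplicatively from the prime-power blocks (then sorts, drops n itself and XORs), instead of A's divisor/cofactor pairing that tests every candidate up to sqrt(n) and pairs each hit with its cofactor.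
import Mathlib
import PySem

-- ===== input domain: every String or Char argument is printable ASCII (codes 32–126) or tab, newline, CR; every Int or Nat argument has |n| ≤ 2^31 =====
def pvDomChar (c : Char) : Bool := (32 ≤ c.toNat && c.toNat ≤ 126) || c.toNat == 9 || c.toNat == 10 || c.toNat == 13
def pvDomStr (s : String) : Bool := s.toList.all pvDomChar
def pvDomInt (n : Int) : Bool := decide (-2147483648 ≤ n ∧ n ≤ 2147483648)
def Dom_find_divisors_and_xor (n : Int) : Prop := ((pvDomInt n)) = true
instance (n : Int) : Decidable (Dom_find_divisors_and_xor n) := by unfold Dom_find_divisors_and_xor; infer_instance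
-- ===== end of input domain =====

-- B factorises n by trial division and generates the divisor list multiplicatively from the
-- prime-power blocks (then sorts, drops n itself and XORs) instead of A's divisor/cofactor
-- pairing that tests every candidate up to sqrt(n).

-- cited by the termination proof of A's loop below
theorem pv_le_sq (i : Int) : i ≤ i * i := by nlinarith [sq_nonneg (i - 1)]

-- ===== PORT A =====
-- while-loop of A: result accumulator, i counts up while i*i ≤ n
def pvALoop (n : Int) (i : Int) (result : List Int) : List Int :=
  if _h : i * i ≤ n then
    pvALoop n (i + 1)
      (if PySem.Int.mod n i = 0 then
        (result ++ [i]) ++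
          (if i ≠ PySem.Int.floordiv n i then [PySem.Int.floordiv n i] else [])
       else result)
  else result
termination_by (n + 1 - i).toNat
decreasing_by
  have hii : i ≤ i * i := pv_le_sq i
  omega

def find_divisors_and_xor (n : Int) : List Int :=
  if n = 1 then [0]
  else
    let result := pvALoop n 2 [1]
    let result := PySem.List.sorted result (fun x => x) false
    let xor_result := result.foldl (fun acc d => PySem.Int.bxor acc d) 0
    result ++ [xor_result]

-- ===== PORT B =====
-- inner while: m //= p; q *= p; powers.append(q) while m % p == 0
-- (the extra conjuncts 0 < m and 2 ≤ p are totality guards only: Python reaches this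
--  loop exclusively with p*p ≤ m and p ≥ 2, where they hold)
def pvInner (p : Int) (m q : Int) (powers : List Int) : Int × Int × List Int :=
  if h : PySem.Int.mod m p = 0 ∧ 0 < m ∧ 2 ≤ p then
    pvInner p (PySem.Int.floordiv m p) (q * p) (powers ++ [q * p])
  else (m, q, powers)
termination_by m.toNat
decreasing_by
  obtain ⟨h1, h2, h3⟩ := h
  rw [PySem.Int.floordiv_eq_ediv_of_pos (by omega)]
  have hge : 0 ≤ m / p := Int.ediv_nonneg (by omega) (by omega)
  have hlt : m / p < m := Int.ediv_lt_of_lt_mul (by omega) (by nlinarith)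
  omega

-- outer while: extract all factors p, extend divisors by the prime-power blocks
-- (the Nat fuel is a totality guard only: the caller passes n.toNat + 1, which exceeds the
--  number of iterations of Python's loop, so the 0-fuel branch is never reached)
def pvOuter : Nat → Int → Int → List Int → Int × List Int
  | 0, m, _, divs => (m, divs)
  | fuel + 1, m, p, divs =>
    if p * p ≤ m then
      pvOuter fuel (pvInner p m 1 []).1 (p + 1)
        (divs ++ (pvInner p m 1 []).2.2.flatMap (fun pk => divs.map (fun d => d * pk)))
    else (m, divs)

def find_divisors_and_xor_alt (n : Int) : List Int :=
  if n = 1 then [0]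
  else
    let t := pvOuter (n.toNat + 1) n 2 [1]
    let divisors := if 1 < t.1 then t.2 ++ t.2.map (fun d => d * t.1) else t.2
    let result := PySem.List.sorted (divisors.filter (fun d => d != n)) (fun x => x) false
    let xor_result := result.foldl (fun acc d => PySem.Int.bxor acc d) 0
    result ++ [xor_result]

-- ===== PRECONDITION & SPEC =====
def Spec_find_divisors_and_xor (n : Int) (out : List Int) : Prop := out = find_divisors_and_xor_alt n
instance (n : Int) (out : List Int) : Decidable (Spec_find_divisors_and_xor n out) := by unfold Spec_find_divisors_and_xor; infer_instance

-- ===== CLAIM (what is proved, stated in full; the proofs are below) =====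
def Claim_equal_find_divisors_and_xor : Prop := ∀ (n : Int), Dom_find_divisors_and_xor n → Spec_find_divisors_and_xor n (find_divisors_and_xor n)

-- ===== LEMMAS AND PROOFS =====

-- accumulator-free form of A's loop
def pvSA (n : Int) (i : Int) : List Int :=
  if _h : i * i ≤ n then
    (if PySem.Int.mod n i = 0 then
      [i] ++ (if i ≠ PySem.Int.floordiv n i then [PySem.Int.floordiv n i] else [])
     else []) ++ pvSA n (i + 1)
  else []
termination_by (n + 1 - i).toNat
decreasing_by
  have hii : i ≤ i * i := pv_le_sq i
  omega

theorem pvALoop_eq (n i : Int) (acc : List Int) : pvALoop n i acc = acc ++ pvSA n i := by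
  induction i, acc using pvALoop.induct n with
  | case1 i acc h ih =>
    rw [pvALoop, pvSA]
    simp only [h, dite_true]
    simp only [dite_eq_ite] at ih
    rw [ih]
    split_ifs <;> simp
  | case2 i acc h =>
    rw [pvALoop, pvSA]
    simp [h]

theorem mem_pvSA (n i : Int) : ∀ x : Int, 0 < i →
    (x ∈ pvSA n i ↔ ∃ j, i ≤ j ∧ j * j ≤ n ∧ j ∣ n ∧
      (x = j ∨ (x = PySem.Int.floordiv n j ∧ j ≠ PySem.Int.floordiv n j))) := by
  induction i using pvSA.induct n with
  | case1 i h ih =>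
    intro x hi
    rw [pvSA]
    simp only [h, dite_true, List.mem_append]
    constructor
    · rintro (hx | hx)
      · by_cases hm : PySem.Int.mod n i = 0
        · refine ⟨i, le_refl i, h, (PySem.Int.mod_eq_zero_iff_dvd n i).mp hm, ?_⟩
          simp only [hm, if_true] at hx
          simp only [List.mem_append, List.mem_singleton] at hx
          rcases hx with hx | hx
          · exact Or.inl hx
          · split_ifs at hx with hne
            · simp only [List.mem_singleton] at hx
              exact Or.inr ⟨hx, hne⟩
            · simp at hx
        · simp [hm] at hx
      · obtain ⟨j, h1, h2, h3, h4⟩ := (ih x (by omega)).mp hx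
        exact ⟨j, by omega, h2, h3, h4⟩
    · rintro ⟨j, hij, hj2, hjd, hx⟩
      by_cases hji : j = i
      · subst hji
        have hm : PySem.Int.mod n j = 0 := (PySem.Int.mod_eq_zero_iff_dvd n j).mpr hjd
        left
        simp only [hm, if_true, List.mem_append, List.mem_singleton]
        rcases hx with hx | ⟨hx, hne⟩
        · exact Or.inl hx
        · right; simp [hne, hx]
      · right
        exact (ih x (by omega)).mpr ⟨j, by omega, hj2, hjd, hx⟩
  | case2 i h =>
    intro x hi
    rw [pvSA]
    simp only [h, dite_false, List.not_mem_nil, false_iff]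
    rintro ⟨j, hij, hj2, -, -⟩
    have : i * i ≤ j * j := mul_le_mul hij hij (by omega) (by omega)
    exact h (le_trans this hj2)

-- divisor arithmetic: exact division facts (all divisors positive)
theorem pv_div_eq (j n : Int) (hj : 0 < j) (hd : j ∣ n) :
    j * PySem.Int.floordiv n j = n := by
  rw [PySem.Int.floordiv_eq_ediv_of_pos hj]
  exact Int.mul_ediv_cancel' hd

theorem pv_le_div (j n : Int) (hj : 0 < j) (h : j * j ≤ n) :
    j ≤ PySem.Int.floordiv n j := by
  rw [PySem.Int.floordiv_eq_ediv_of_pos hj]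
  exact (Int.le_ediv_iff_mul_le hj).mpr h

theorem nodup_pvSA (n i : Int) : 2 ≤ i → (pvSA n i).Nodup := by
  induction i using pvSA.induct n with
  | case1 i h ih =>
    intro hi
    rw [pvSA]
    simp only [h, dite_true]
    refine List.Nodup.append ?_ (ih (by omega)) ?_
    · split_ifs with hm hne
      · simp [hne]
      · simp
      · simp
    · intro x hxblk hxrest
      obtain ⟨j, hij, hj2, hjd, hx⟩ := (mem_pvSA n (i + 1) x (by omega)).mp hxrest
      have hij' : i < j := by omega
      have hj0 : 0 < j := by omega
      have hi0 : 0 < i := by omega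
      have hbj : j * PySem.Int.floordiv n j = n := pv_div_eq j n hj0 hjd
      have hlbj : j ≤ PySem.Int.floordiv n j := pv_le_div j n hj0 hj2
      by_cases hm : PySem.Int.mod n i = 0
      · have hid : i ∣ n := (PySem.Int.mod_eq_zero_iff_dvd n i).mp hm
        have hbi : i * PySem.Int.floordiv n i = n := pv_div_eq i n hi0 hid
        simp only [hm, if_true, List.mem_append, List.mem_singleton] at hxblk
        set a := PySem.Int.floordiv n i with ha
        set b := PySem.Int.floordiv n j with hb
        rcases hxblk with hx1 | hx1
        · subst hx1
          rcases hx with hx | ⟨hx, -⟩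
          · omega
          · omega
        · split_ifs at hx1 with hne
          · simp only [List.mem_singleton] at hx1
            subst hx1
            rcases hx with hx | ⟨hx, -⟩
            · rw [hx] at hbi
              have h2 : j * j ≤ i * j := by omega
              have h3 : j ≤ i := le_of_mul_le_mul_right h2 hj0
              omega
            · rw [hx] at hbi
              have hb0 : (0 : Int) < b := by omega
              have h0 : i * b = j * b := by omega
              have : i = j := mul_right_cancel₀ (ne_of_gt hb0) h0
              omega
          · simp at hx1
      · simp [hm] at hxblk
  | case2 i h =>
    intro _
    rw [pvSA]
    simp [h]

theorem one_notmem_pvSA (n : Int) : (1 : Int) ∉ pvSA n 2 := by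
  intro hx
  obtain ⟨j, hj1, hj2, hjd, hcase⟩ := (mem_pvSA n 2 1 (by omega)).mp hx
  have hlbj : j ≤ PySem.Int.floordiv n j := pv_le_div j n (by omega) hj2
  rcases hcase with h | ⟨h, -⟩ <;> omega

-- canonical proof-side object: the proper divisors 2..n-1 of n in ascending order
def pvDivs (n : Int) : List Int :=
  (PySem.List.pyRange 2 n 1).filter (fun i => PySem.Int.mod n i == 0)

theorem mem_pvDivs (n x : Int) :
    x ∈ pvDivs n ↔ 2 ≤ x ∧ x < n ∧ x ∣ n := by
  unfold pvDivs
  rw [List.mem_filter, PySem.List.mem_pyRange_one]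
  simp only [beq_iff_eq, PySem.Int.mod_eq_zero_iff_dvd]
  tauto

theorem pairwise_one_pvDivs (n : Int) :
    ((1 : Int) :: pvDivs n).Pairwise (· < ·) := by
  rw [List.pairwise_cons]
  constructor
  · intro b hb
    have := (mem_pvDivs n b).mp hb
    omega
  · exact (PySem.List.pairwise_lt_pyRange_one 2 n).filter _

-- A's sorted divisor list is exactly the canonical ascending proper-divisor list
theorem sorted_main (n : Int) :
    PySem.List.sorted ([1] ++ pvSA n 2 : List Int) (fun x => x) false = 1 :: pvDivs n := by
  have hnodupA : ([1] ++ pvSA n 2 : List Int).Nodup := by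
    refine List.Nodup.append (by simp) (nodup_pvSA n 2 (by omega)) ?_
    intro x hx1 hx2
    simp only [List.mem_singleton] at hx1
    subst hx1
    exact one_notmem_pvSA n hx2
  have hpw := pairwise_one_pvDivs n
  have hnodupB : ((1 : Int) :: pvDivs n).Nodup := hpw.imp ne_of_lt
  have hmem : ∀ x : Int, x ∈ ((1 : Int) :: pvDivs n) ↔ x ∈ ([1] ++ pvSA n 2 : List Int) := by
    intro x
    simp only [List.mem_cons, List.mem_append, List.not_mem_nil, or_false]
    constructor
    · rintro (hx | hx)
      · exact Or.inl hx
      · right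
        obtain ⟨h2x, hxn, hxd⟩ := (mem_pvDivs n x).mp hx
        have hx0 : (0 : Int) < x := by omega
        set q := PySem.Int.floordiv n x with hqdef
        have hq : x * q = n := pv_div_eq x n hx0 hxd
        have hq1 : 1 < q := by nlinarith
        rcases le_or_gt x q with hle | hgt
        · exact (mem_pvSA n 2 x (by omega)).mpr ⟨x, h2x, by nlinarith, hxd, Or.inl rfl⟩
        · have hq0 : (0 : Int) < q := by omega
          have hqd : q ∣ n := ⟨x, by linarith [hq, mul_comm x q]⟩
          have hq2 : q * PySem.Int.floordiv n q = n := pv_div_eq q n hq0 hqd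
          have hfx : PySem.Int.floordiv n q = x := by
            have : q * PySem.Int.floordiv n q = q * x := by rw [hq2]; nlinarith
            exact mul_left_cancel₀ (ne_of_gt hq0) this
          refine (mem_pvSA n 2 x (by omega)).mpr ⟨q, by omega, by nlinarith, hqd, Or.inr ⟨hfx.symm, ?_⟩⟩
          rw [hfx]; omega
    · rintro (hx | hx)
      · exact Or.inl hx
      · right
        obtain ⟨j, hj2, hjn, hjd, hcase⟩ := (mem_pvSA n 2 x (by omega)).mp hx
        have hj0 : (0 : Int) < j := by omega
        have hq : j * PySem.Int.floordiv n j = n := pv_div_eq j n hj0 hjd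
        have hle : j ≤ PySem.Int.floordiv n j := pv_le_div j n hj0 hjn
        set q := PySem.Int.floordiv n j with hqdef
        rcases hcase with hxj | ⟨hxq, hne⟩
        · subst hxj
          refine (mem_pvDivs n x).mpr ⟨hj2, ?_, hjd⟩
          nlinarith
        · subst hxq
          have hlt : j < q := lt_of_le_of_ne hle hne
          refine (mem_pvDivs n q).mpr ⟨by omega, by nlinarith, ⟨j, by linarith [mul_comm j q]⟩⟩
  have hperm : ((1 : Int) :: pvDivs n).Perm ([1] ++ pvSA n 2 : List Int) :=
    (List.perm_ext_iff_of_nodup hnodupB hnodupA).mpr hmem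
  exact PySem.List.sorted_eq_of_perm_of_pairwise_lt _ _ _ hperm hpw


-- ---------- B-side: the factorisation loop produces exactly the divisors ----------

-- m has no divisor strictly between 1 and p
def NoSmallFac (m p : Int) : Prop := ∀ d : Int, 1 < d → d ∣ m → p ≤ d

theorem pvInner_spec (p : Int) (hp : 2 ≤ p) : ∀ m q pw, 0 < m →
    ∃ (e : Nat) (m₁ : Int),
      pvInner p m q pw = (m₁, q * p ^ e, pw ++ (List.range e).map (fun j => q * p ^ (j+1))) ∧
      m = m₁ * p ^ e ∧ 0 < m₁ ∧ ¬ p ∣ m₁ := by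
  intro m q pw
  induction m, q, pw using pvInner.induct p with
  | case1 m q pw h ih =>
    intro _
    obtain ⟨h1, h2, h3⟩ := h
    have hpd : p ∣ m := (PySem.Int.mod_eq_zero_iff_dvd m p).mp h1
    have hkey : PySem.Int.floordiv m p * p = m := by
      rw [PySem.Int.floordiv_eq_ediv_of_pos (by omega)]
      exact Int.ediv_mul_cancel hpd
    have hm' : 0 < PySem.Int.floordiv m p := by
      by_contra hc
      push Not at hc
      nlinarith
    obtain ⟨e, m₁, heq, hfac, hpos, hnd⟩ := ih hm'
    refine ⟨e + 1, m₁, ?_, ?_, hpos, hnd⟩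
    · rw [pvInner]
      simp only [h1, h2, h3, and_true, dite_true]
      rw [heq]
      refine congrArg (Prod.mk m₁) ?_
      refine congrArg₂ Prod.mk (by ring) ?_
      rw [List.range_succ_eq_map, List.map_cons, List.map_map]
      simp only [List.append_assoc, List.singleton_append]
      refine congrArg (pw ++ ·) (congrArg₂ List.cons (by ring) ?_)
      refine List.map_congr_left ?_
      intro j _
      show q * p * p ^ (j + 1) = q * p ^ (j + 1 + 1)
      ring
    · calc m = PySem.Int.floordiv m p * p := hkey.symm
        _ = m₁ * p ^ e * p := by rw [hfac]
        _ = m₁ * p ^ (e + 1) := by ring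
  | case2 m q pw h =>
    intro hm
    refine ⟨0, m, ?_, by ring, hm, ?_⟩
    · rw [pvInner]
      simp [h]
    · intro hpd
      exact h ⟨(PySem.Int.mod_eq_zero_iff_dvd m p).mpr hpd, hm, hp⟩

theorem pv_prime_of_nosmall (p m : Int) (hp : 2 ≤ p) (hd : p ∣ m) (hns : NoSmallFac m p) :
    Prime p := by
  rw [Int.prime_iff_natAbs_prime]
  rw [Nat.prime_def_lt]
  have hcast : (p.natAbs : Int) = p := Int.natAbs_of_nonneg (by omega)
  constructor
  · omega
  · intro d hdlt hdd
    by_contra hd1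
    have hd0 : d ≠ 0 := by
      rintro rfl
      have : p.natAbs = 0 := Nat.eq_zero_of_zero_dvd hdd
      omega
    have hdInt : (d : Int) ∣ p := by
      rw [← hcast]
      exact_mod_cast hdd
    have hge : p ≤ (d : Int) := hns d (by omega) (dvd_trans hdInt hd)
    omega

theorem pv_last_prime (m p : Int) (hm : 0 < m) (hp : 2 ≤ p) (hbig : ¬ p * p ≤ m)
    (hns : NoSmallFac m p) : m = 1 ∨ Prime m := by
  by_cases hm1 : m = 1
  · exact Or.inl hm1
  · right
    have hcast : (m.natAbs : Int) = m := Int.natAbs_of_nonneg (by omega)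
    obtain ⟨π, hπp, hπd⟩ := Nat.exists_prime_and_dvd (n := m.natAbs) (by omega)
    have hπInt : (π : Int) ∣ m := by
      rw [← hcast]
      exact_mod_cast hπd
    obtain ⟨c, hc⟩ := hπInt
    have hπ2 : (2 : Int) ≤ π := by exact_mod_cast hπp.two_le
    have hcpos : 0 < c := by nlinarith
    have hπge : p ≤ (π : Int) := hns π (by omega) ⟨c, hc⟩
    by_cases hc1 : c = 1
    · subst hc1
      rw [Int.prime_iff_natAbs_prime]
      have : m = (π : Int) := by omega
      rw [this]
      simpa using hπp
    · exfalso
      have hcd : c ∣ m := ⟨π, by rw [hc]; ring⟩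
      have hcge : p ≤ c := hns c (by omega) hcd
      have : p * p ≤ m := by nlinarith
      exact hbig this

-- extending the divisor list of K by the prime-power blocks of π^e
theorem pv_step (K π : Int) (e : Nat) (divs : List Int)
    (hK : 0 < K) (hπ : Prime π) (hπ2 : 2 ≤ π) (hcop : IsCoprime K π)
    (hnd : divs.Nodup) (hmem : ∀ x, x ∈ divs ↔ 0 < x ∧ x ∣ K) :
    (divs ++ ((List.range e).map (fun j => π ^ (j+1))).flatMap
        (fun pk => divs.map (fun d => d * pk))).Nodup ∧
    (∀ x, x ∈ divs ++ ((List.range e).map (fun j => π ^ (j+1))).flatMap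
        (fun pk => divs.map (fun d => d * pk)) ↔ 0 < x ∧ x ∣ K * π ^ e) := by
  have hπ0 : (0 : Int) < π := by omega
  have hnodvd : ∀ d ∈ divs, ¬ π ∣ d := by
    intro d hd hdvd
    have hdK : d ∣ K := ((hmem d).mp hd).2
    have hcd : IsCoprime π d := (hcop.of_isCoprime_of_dvd_left hdK).symm
    exact (hπ.coprime_iff_not_dvd.mp hcd) hdvd
  have hπdvd_flat : ∀ x, x ∈ ((List.range e).map (fun j => π ^ (j+1))).flatMap
      (fun pk => divs.map (fun d => d * pk)) → π ∣ x := by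
    intro x hx
    obtain ⟨pk, hpk, hxin⟩ := List.mem_flatMap.mp hx
    obtain ⟨j, hj, rfl⟩ := List.mem_map.mp hpk
    obtain ⟨d, hd, rfl⟩ := List.mem_map.mp hxin
    exact Dvd.dvd.mul_left (dvd_pow_self π (Nat.succ_ne_zero j)) d
  constructor
  · refine List.Nodup.append hnd ?_ ?_
    · rw [List.nodup_flatMap]
      constructor
      · intro pk hpk
        obtain ⟨j, hj, rfl⟩ := List.mem_map.mp hpk
        exact hnd.map (mul_left_injective₀ (pow_ne_zero _ (by omega)))
      · rw [List.pairwise_map]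
        refine List.Pairwise.imp_of_mem ?_ (List.pairwise_lt_range)
        intro j1 j2 hj1 hj2 hlt x hx1 hx2
        obtain ⟨d1, hd1, he1⟩ := List.mem_map.mp hx1
        obtain ⟨d2, hd2, he2⟩ := List.mem_map.mp hx2
        have hpow : π ^ (j2 + 1) = π ^ (j2 - j1) * π ^ (j1 + 1) := by
          rw [← pow_add]
          congr 1
          omega
        have hc : d1 = d2 * π ^ (j2 - j1) := by
          refine mul_right_cancel₀ (pow_ne_zero (j1 + 1) (by omega : π ≠ 0)) ?_
          rw [he1, ← he2, hpow]
          ring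
        have : π ∣ d1 := by
          rw [hc]
          exact Dvd.dvd.mul_left (dvd_pow_self π (by omega)) d2
        exact hnodvd d1 hd1 this
    · intro x hx hx2
      exact hnodvd x hx (hπdvd_flat x hx2)
  · intro x
    rw [List.mem_append]
    constructor
    · rintro (hx | hx)
      · obtain ⟨hx0, hxK⟩ := (hmem x).mp hx
        exact ⟨hx0, hxK.mul_right _⟩
      · obtain ⟨pk, hpk, hxin⟩ := List.mem_flatMap.mp hx
        obtain ⟨j, hj, rfl⟩ := List.mem_map.mp hpk
        obtain ⟨d, hd, rfl⟩ := List.mem_map.mp hxin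
        obtain ⟨hd0, hdK⟩ := (hmem d).mp hd
        have hjlt : j < e := List.mem_range.mp hj
        refine ⟨by positivity, mul_dvd_mul hdK (pow_dvd_pow π (by omega))⟩
    · rintro ⟨hx0, hxd⟩
      obtain ⟨a, b, ha, hb, hxe⟩ := exists_dvd_and_dvd_of_dvd_mul hxd
      have hb0 : b ≠ 0 := by
        rintro rfl
        rw [mul_zero] at hxe
        omega
      have ha0 : a ≠ 0 := by
        rintro rfl
        rw [zero_mul] at hxe
        omega
      have habs : |a| * |b| = x := by
        rw [← abs_mul, ← hxe]
        exact abs_of_pos hx0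
      have haK : |a| ∣ K := (abs_dvd a K).mpr ha
      have hbp : |b| ∣ π ^ e := (abs_dvd _ _).mpr hb
      obtain ⟨j, hje, hassoc⟩ := (dvd_prime_pow hπ e).mp hbp
      have hbeq : |b| = π ^ j := by
        rcases Int.associated_iff.mp hassoc with h | h
        · exact h
        · exfalso
          have hp1 : 0 < π ^ j := by positivity
          have hp2 : 0 ≤ |b| := abs_nonneg b
          omega
      have hamem : |a| ∈ divs := (hmem _).mpr ⟨abs_pos.mpr ha0, haK⟩
      cases j with
      | zero =>
        left
        have : x = |a| := by
          rw [← habs, hbeq, pow_zero, mul_one]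
        rw [this]
        exact hamem
      | succ j' =>
        right
        rw [List.mem_flatMap]
        refine ⟨π ^ (j' + 1), List.mem_map.mpr ⟨j', List.mem_range.mpr (by omega), rfl⟩, ?_⟩
        rw [List.mem_map]
        exact ⟨|a|, hamem, by rw [← hbeq, habs]⟩

theorem pvOuter_spec : ∀ (fuel : Nat) (m p : Int) (divs : List Int), ∀ (N K : Int),
    (m + 1 - p).toNat < fuel →
    2 ≤ p → 0 < m → 0 < K → N = K * m → IsCoprime K m → NoSmallFac m p →
    divs.Nodup → (∀ x, x ∈ divs ↔ 0 < x ∧ x ∣ K) →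
    0 < (pvOuter fuel m p divs).1 ∧ ((pvOuter fuel m p divs).1 = 1 ∨ Prime (pvOuter fuel m p divs).1) ∧
      ∃ K', 0 < K' ∧ N = K' * (pvOuter fuel m p divs).1 ∧ IsCoprime K' (pvOuter fuel m p divs).1 ∧
        (pvOuter fuel m p divs).2.Nodup ∧ (∀ x, x ∈ (pvOuter fuel m p divs).2 ↔ 0 < x ∧ x ∣ K') := by
  intro fuel
  induction fuel with
  | zero =>
    intro m p divs N K hfuel
    omega
  | succ f ih =>
    intro m p divs N K hfuel hp hm hK hN hcop hns hnd hmem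
    show _ ∧ _ ∧ _
    by_cases h : p * p ≤ m
    · obtain ⟨e, m₁, heq, hfac, hm₁, hnd₁⟩ := pvInner_spec p hp m 1 [] hm
      have hple : p ≤ p * p := pv_le_sq p
      have hpe1 : (1 : Int) ≤ p ^ e := one_le_pow₀ (by omega)
      have hm₁le : m₁ ≤ m := by nlinarith
      have hfuel' : (m₁ + 1 - (p + 1)).toNat < f := by omega
      have ihs := fun N K => ih m₁ (p + 1) (divs ++
        ((List.range e).map (fun j => p ^ (j+1))).flatMap (fun pk => divs.map (fun d => d * pk)))
        N K hfuel'
      rw [pvOuter]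
      simp only [h, if_true]
      rw [heq]
      simp only [List.nil_append, one_mul]
      by_cases he : e = 0
      · subst he
        simp only [List.range_zero, List.map_nil, List.flatMap_nil, List.append_nil] at ihs ⊢
        rw [pow_zero, mul_one] at hfac
        subst hfac
        refine ihs N K (by omega) hm₁ hK hN hcop ?_ hnd hmem
        intro d hd1 hdd
        have := hns d hd1 hdd
        have hne : d ≠ p := by
          rintro rfl
          exact hnd₁ hdd
        omega
      · have hpdvd : p ∣ m := by
          refine ⟨m₁ * p ^ (e - 1), ?_⟩
          rw [hfac]
          have : p ^ e = p * p ^ (e - 1) := by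
            rw [← pow_succ']
            congr 1
            omega
          rw [this]
          ring
        have hπ : Prime p := pv_prime_of_nosmall p m hp hpdvd hns
        have hm₁dvd : m₁ ∣ m := ⟨p ^ e, hfac⟩
        have hcopKp : IsCoprime K p := hcop.of_isCoprime_of_dvd_right hpdvd
        obtain ⟨hnd', hmem'⟩ := pv_step K p e divs hK hπ hp hcopKp hnd hmem
        refine ihs N (K * p ^ e) (by omega) hm₁ (by positivity) (by rw [hN, hfac]; ring) ?_ ?_ hnd' hmem'
        · exact (hcop.of_isCoprime_of_dvd_right hm₁dvd).mul_left
            ((hπ.coprime_iff_not_dvd.mpr hnd₁).pow_left)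
        · intro d hd1 hdd
          have := hns d hd1 (hdd.trans hm₁dvd)
          have hne : d ≠ p := by
            rintro rfl
            exact hnd₁ hdd
          omega
    · rw [pvOuter]
      simp only [h, if_false]
      exact ⟨hm, pv_last_prime m p hm hp h hns, K, hK, hN, hcop, hnd, hmem⟩

-- B's divisor list (after the final prime step) is nodup with exactly the divisors of n
theorem pvB_divisors (n : Int) (hn : 2 ≤ n) :
    (if 1 < (pvOuter (n.toNat + 1) n 2 [1]).1 then
        (pvOuter (n.toNat + 1) n 2 [1]).2 ++ (pvOuter (n.toNat + 1) n 2 [1]).2.map (fun d => d * (pvOuter (n.toNat + 1) n 2 [1]).1)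
      else (pvOuter (n.toNat + 1) n 2 [1]).2).Nodup ∧
    (∀ x, x ∈ (if 1 < (pvOuter (n.toNat + 1) n 2 [1]).1 then
        (pvOuter (n.toNat + 1) n 2 [1]).2 ++ (pvOuter (n.toNat + 1) n 2 [1]).2.map (fun d => d * (pvOuter (n.toNat + 1) n 2 [1]).1)
      else (pvOuter (n.toNat + 1) n 2 [1]).2) ↔ 0 < x ∧ x ∣ n) := by
  have base : ∀ x : Int, x ∈ ([1] : List Int) ↔ 0 < x ∧ x ∣ 1 := by
    intro x
    simp only [List.mem_singleton]
    constructor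
    · rintro rfl
      exact ⟨one_pos, dvd_refl 1⟩
    · rintro ⟨h0, hd⟩
      exact Int.eq_one_of_dvd_one (by omega) hd
  obtain ⟨hr0, hrp, K', hK', hNK, hcopK, hndK, hmemK⟩ :=
    pvOuter_spec (n.toNat + 1) n 2 [1] n 1 (by omega) (le_refl 2) (by omega) one_pos (by ring)
      (isCoprime_one_left) (fun d hd _ => by omega) (by simp) base
  rcases hrp with hone | hπ
  · rw [hone]
    simp only [lt_irrefl, if_false]
    have hKn : K' = n := by rw [hNK, hone, mul_one]
    exact ⟨hndK, fun x => by rw [hmemK x, hKn]⟩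
  · have hr2 : 2 ≤ (pvOuter (n.toNat + 1) n 2 [1]).1 := by
      have := hπ.ne_one
      omega
    simp only [show (1 : Int) < (pvOuter (n.toNat + 1) n 2 [1]).1 by omega, if_true]
    obtain ⟨hnd', hmem'⟩ := pv_step K' (pvOuter (n.toNat + 1) n 2 [1]).1 1 (pvOuter (n.toNat + 1) n 2 [1]).2
      hK' hπ hr2 hcopK hndK hmemK
    simp only [List.range_one, List.map_cons, List.map_nil, List.flatMap_cons,
      List.flatMap_nil, List.append_nil, zero_add, pow_one] at hnd' hmem'
    refine ⟨hnd', fun x => ?_⟩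
    rw [hmem' x, ← hNK]

theorem mem_one_pvDivs (n x : Int) (hn : 2 ≤ n) :
    x ∈ ((1 : Int) :: pvDivs n) ↔ 0 < x ∧ x ∣ n ∧ x ≠ n := by
  rw [List.mem_cons, mem_pvDivs]
  constructor
  · rintro (rfl | ⟨h2, hlt, hd⟩)
    · exact ⟨one_pos, one_dvd n, by omega⟩
    · exact ⟨by omega, hd, by omega⟩
  · rintro ⟨h0, hd, hne⟩
    by_cases hx1 : x = 1
    · exact Or.inl hx1
    · have hle : x ≤ n := Int.le_of_dvd (by omega) hd
      exact Or.inr ⟨by omega, by omega, hd⟩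

-- B's sorted list equals the canonical ascending proper-divisor list
theorem pvB_sorted (n : Int) (hn : n ≠ 1) :
    PySem.List.sorted
      ((if 1 < (pvOuter (n.toNat + 1) n 2 [1]).1 then
          (pvOuter (n.toNat + 1) n 2 [1]).2 ++ (pvOuter (n.toNat + 1) n 2 [1]).2.map (fun d => d * (pvOuter (n.toNat + 1) n 2 [1]).1)
        else (pvOuter (n.toNat + 1) n 2 [1]).2).filter (fun d => d != n)) (fun x => x) false
      = 1 :: pvDivs n := by
  by_cases hge : 2 ≤ n
  · obtain ⟨hnd, hmem⟩ := pvB_divisors n hge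
    have hndF := hnd.filter (fun d => d != n)
    have hmemF : ∀ x : Int, x ∈ (if 1 < (pvOuter (n.toNat + 1) n 2 [1]).1 then
          (pvOuter (n.toNat + 1) n 2 [1]).2 ++ (pvOuter (n.toNat + 1) n 2 [1]).2.map (fun d => d * (pvOuter (n.toNat + 1) n 2 [1]).1)
        else (pvOuter (n.toNat + 1) n 2 [1]).2).filter (fun d => d != n) ↔ 0 < x ∧ x ∣ n ∧ x ≠ n := by
      intro x
      rw [List.mem_filter, hmem x, bne_iff_ne]
      tauto
    have hpw := pairwise_one_pvDivs n
    have hndC : ((1 : Int) :: pvDivs n).Nodup := hpw.imp ne_of_lt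
    have hperm : ((1 : Int) :: pvDivs n).Perm _ :=
      (List.perm_ext_iff_of_nodup hndC hndF).mpr
        (fun x => by rw [mem_one_pvDivs n x hge, hmemF x])
    exact PySem.List.sorted_eq_of_perm_of_pairwise_lt _ _ _ hperm hpw
  · have hle : n ≤ 0 := by omega
    rw [show n.toNat + 1 = 1 by omega]
    rw [pvOuter]
    simp only [show ¬ ((2 : Int) * 2 ≤ n) by omega, if_false]
    simp only [show ¬ ((1 : Int) < n) by omega, if_false]
    have hfil : ([1] : List Int).filter (fun d => d != n) = [1] := by
      simp only [List.filter_cons, List.filter_nil, bne_iff_ne, ne_eq,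
        show ¬ ((1 : Int) = n) by omega, not_false_eq_true, decide_true]
      simp [show (1 : Int) ≠ n by omega]
    rw [hfil]
    have hC : pvDivs n = [] := by
      unfold pvDivs
      rw [PySem.List.pyRange_one_eq_nil (by omega)]
      rfl
    rw [hC]
    exact PySem.List.sorted_eq_of_perm_of_pairwise_lt _ _ _ (List.Perm.refl _) (by simp)

-- ===== VERDICT (by name: the statement is the Claim_ definition above) =====
theorem find_divisors_and_xor_spec : Claim_equal_find_divisors_and_xor := by
  intro n _
  unfold Spec_find_divisors_and_xor find_divisors_and_xor find_divisors_and_xor_alt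
  by_cases h1 : n = 1
  · simp [h1]
  · simp only [h1, if_false, pvALoop_eq]
    rw [sorted_main n, pvB_sorted n h1]
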